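-- pv_equiv track=rewrite | github.com/QQuinn03/LeetHub | range-addition/range-addition.py | getModifiedArray
-- ===== SOURCE A (Python) =====
-- from typing import List
--
-- def getModifiedArray(length: int, updates: List[List[int]]) -> List[int]:
--     res=[0 for i in range(length)]
--
--     for update in updates:
--         start=update[0]
--         end=update[1]
--         val=update[2]
--
--         res[start]+=val
--         if end+1<len(res):
--             res[end+1]-=val
--
--     for i in range(1,len(res)):
--         res[i]+=res[i-1]
--     return res
-- ===== SOURCE B (Python) =====
-- from typing import List
--
-- def getModifiedArray(length: int, updates: List[List[int]]) -> List[int]: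
--     res = [0] * length
--     for u in updates:
--         res[u[0]:] = [x + u[2] for x in res[u[0]:]]
--         res[u[1] + 1:] = [x - u[2] for x in res[u[1] + 1:]]
--     return res
-- ===== Notes on version B (the rewrite author's own statement) =====
-- stated objective: alternative
-- what changed: Replaces A's difference array (two boundary deltas per update followed by a prefix-sum pass) by direct per-update slice updates: add val to the whole suffix res[start:] and subtract it from the suffix res[end+1:], with no boundary marks and no prefix-sum pass.
import Mathlib
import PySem

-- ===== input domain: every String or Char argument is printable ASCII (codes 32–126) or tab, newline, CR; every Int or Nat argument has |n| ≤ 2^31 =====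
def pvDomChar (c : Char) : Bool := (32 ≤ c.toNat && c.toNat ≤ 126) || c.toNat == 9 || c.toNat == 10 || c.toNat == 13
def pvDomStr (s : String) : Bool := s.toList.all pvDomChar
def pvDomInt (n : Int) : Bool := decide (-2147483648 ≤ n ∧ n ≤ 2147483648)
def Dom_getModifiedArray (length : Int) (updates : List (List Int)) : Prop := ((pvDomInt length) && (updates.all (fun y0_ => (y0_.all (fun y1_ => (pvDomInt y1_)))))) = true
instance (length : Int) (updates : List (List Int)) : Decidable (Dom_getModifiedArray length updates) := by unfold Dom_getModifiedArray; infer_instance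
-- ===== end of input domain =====

-- B replaces A's difference array + prefix-sum pass by direct per-update slice updates (add val
-- to the suffix from start, subtract it from the suffix past end); objective: alternative (not faster).

-- ===== PORT A =====
-- body of A's per-update loop: res[start]+=val; if end+1<len(res): res[end+1]-=val
def pvStepA (res : List Int) (update : List Int) : List Int :=
  let start := PySem.List.pyGetD update 0 0
  let endv := PySem.List.pyGetD update 1 0
  let val := PySem.List.pyGetD update 2 0
  let res := PySem.List.pySetD res start (PySem.List.pyGetD res start 0 + val)
  if endv + 1 < (res.length : Int) then
    PySem.List.pySetD res (endv + 1) (PySem.List.pyGetD res (endv + 1) 0 - val)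
  else res

-- A's final pass: for i in range(1, len(res)): res[i] += res[i-1]
def pvPrefixPass (res : List Int) : List Int :=
  (PySem.List.pyRange 1 (res.length : Int)).foldl
    (fun r i => PySem.List.pySetD r i (PySem.List.pyGetD r i 0 + PySem.List.pyGetD r (i - 1) 0)) res

def getModifiedArray (length : Int) (updates : List (List Int)) : List Int :=
  pvPrefixPass (updates.foldl pvStepA ((PySem.List.pyRange 0 length).map (fun _ => (0 : Int))))

-- ===== PORT B =====
-- res[u[0]:] = [x + u[2] for x in res[u[0]:]]; res[u[1]+1:] = [x - u[2] for x in res[u[1]+1:]]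
-- (a same-length slice assignment res[i:] = new is res[:i] ++ new — exact Python semantics)
def pvStepB (res : List Int) (u : List Int) : List Int :=
  let res1 := PySem.List.slice res none (some (PySem.List.pyGetD u 0 0)) ++
    (PySem.List.slice res (some (PySem.List.pyGetD u 0 0)) none).map
      (fun x => x + PySem.List.pyGetD u 2 0)
  PySem.List.slice res1 none (some (PySem.List.pyGetD u 1 0 + 1)) ++
    (PySem.List.slice res1 (some (PySem.List.pyGetD u 1 0 + 1)) none).map
      (fun x => x - PySem.List.pyGetD u 2 0)

def getModifiedArray_alt (length : Int) (updates : List (List Int)) : List Int :=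
  updates.foldl pvStepB (List.replicate length.toNat 0)

-- ===== PRECONDITION & SPEC =====
-- Pre_ is exactly A's domain: each update needs at least three entries, a start index that is a
-- valid (possibly negative, Python-wrapped) index of the length-sized array, and, when the end+1
-- mark falls inside the array, that mark must be a valid index too; otherwise A raises IndexError.
def Pre_getModifiedArray (length : Int) (updates : List (List Int)) : Prop :=
  ∀ u ∈ updates, 3 ≤ u.length ∧
    -length ≤ PySem.List.pyGetD u 0 0 ∧
    PySem.List.pyGetD u 0 0 < length ∧
    (PySem.List.pyGetD u 1 0 + 1 < length →
     -length ≤ PySem.List.pyGetD u 1 0 + 1)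
instance (length : Int) (updates : List (List Int)) : Decidable (Pre_getModifiedArray length updates) := by
  unfold Pre_getModifiedArray; infer_instance

def pvWitness_getModifiedArray : Int × List (List Int) := (3, [[0, 1, 2], [1, 2, -1]])

def Spec_getModifiedArray (length : Int) (updates : List (List Int)) (out : List Int) : Prop := out = getModifiedArray_alt length updates
instance (length : Int) (updates : List (List Int)) (out : List Int) : Decidable (Spec_getModifiedArray length updates out) := by unfold Spec_getModifiedArray; infer_instance

-- ===== CLAIM (what is proved, stated in full; the proofs are below) =====
def Claim_equal_getModifiedArray : Prop := ∀ (length : Int) (updates : List (List Int)), Dom_getModifiedArray length updates → Pre_getModifiedArray length updates → Spec_getModifiedArray length updates (getModifiedArray length updates)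

-- ===== LEMMAS AND PROOFS =====

-- prefix sum of the first j+1 entries (read with pyGetD, default 0)
def pvPartial (res : List Int) (j : Nat) : Int :=
  ((List.range (j + 1)).map (fun k : Nat => PySem.List.pyGetD res (k : Int) 0)).sum

-- net contribution of update u to prefix position j in a list of length L (A's marks, cumulated)
def pvContrib (u : List Int) (L : Int) (j : Nat) : Int :=
  (if (if PySem.List.pyGetD u 0 0 < 0 then PySem.List.pyGetD u 0 0 + L else PySem.List.pyGetD u 0 0) ≤ (j : Int)
   then PySem.List.pyGetD u 2 0 else 0) +
  (if (PySem.List.pyGetD u 1 0 + 1 < L ∧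
       (if PySem.List.pyGetD u 1 0 + 1 < 0 then PySem.List.pyGetD u 1 0 + 1 + L else PySem.List.pyGetD u 1 0 + 1) ≤ (j : Int))
   then -PySem.List.pyGetD u 2 0 else 0)

lemma pv_ext {xs ys : List Int} (hl : xs.length = ys.length)
    (h : ∀ j : Nat, j < ys.length → PySem.List.pyGetD xs (j : Int) 0 = PySem.List.pyGetD ys (j : Int) 0) :
    xs = ys := by
  apply List.ext_getElem hl
  intro i h1 h2
  have := h i h2
  rw [PySem.List.pyGetD_natCast, PySem.List.pyGetD_natCast,
      List.getD_eq_getElem xs 0 h1, List.getD_eq_getElem ys 0 h2] at this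
  exact this

lemma pv_len_foldl {α : Type} (step : List Int → α → List Int)
    (h : ∀ r x, (step r x).length = r.length) :
    ∀ (l : List α) (res : List Int), (l.foldl step res).length = res.length := by
  intro l
  induction l with
  | nil => intro res; rfl
  | cons x t ih => intro res; simpa [List.foldl, h] using ih (step res x)

lemma pv_len_stepA (res u : List Int) : (pvStepA res u).length = res.length := by
  unfold pvStepA
  dsimp only
  split <;> simp [PySem.List.length_pySetD]

-- B-side: Python slice bounds turned into take/drop at the normalized index
lemma pv_slice_split (r : List Int) (i : Int) :
    PySem.List.slice r none (some i) = r.take (if i < 0 then (i + r.length).toNat else i.toNat) ∧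
    PySem.List.slice r (some i) none = r.drop (if i < 0 then (i + r.length).toNat else i.toNat) := by
  by_cases h : i < 0
  · have hk : 0 < (-i).toNat := by omega
    have hi' : i = -(((-i).toNat : Nat) : Int) := by omega
    rw [if_pos h]
    constructor
    · rw [hi', PySem.List.slice_to_neg_natCast r _ hk]
      congr 1
      omega
    · rw [hi', PySem.List.slice_from_neg_natCast r _ hk]
      congr 1
      omega
  · rw [if_neg h]
    exact ⟨PySem.List.slice_to r (show (0:Int) ≤ i by omega),
           PySem.List.slice_from r (show (0:Int) ≤ i by omega)⟩

lemma pv_take_drop_len (r : List Int) (k : Nat) (f : Int → Int) :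
    (r.take k ++ (r.drop k).map f).length = r.length := by
  simp [List.length_take, List.length_drop]
  omega

lemma pv_take_drop_get (r : List Int) (k : Nat) (f : Int → Int) (j : Nat) (hj : j < r.length) :
    PySem.List.pyGetD (r.take k ++ (r.drop k).map f) (j : Int) 0 =
      if k ≤ j then f (PySem.List.pyGetD r (j : Int) 0) else PySem.List.pyGetD r (j : Int) 0 := by
  rw [PySem.List.pyGetD_natCast, PySem.List.pyGetD_natCast,
      List.getD_eq_getElem?_getD, List.getD_eq_getElem?_getD,
      List.getElem?_eq_getElem hj]
  by_cases h : k ≤ j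
  · rw [if_pos h]
    rw [List.getElem?_append_right (by simp [List.length_take]; omega)]
    have hmin : min k r.length = k := by omega
    simp only [List.length_take, hmin, List.getElem?_map, List.getElem?_drop]
    have hidx : k + (j - k) = j := by omega
    rw [hidx, List.getElem?_eq_getElem hj]
    rfl
  · rw [if_neg h]
    rw [List.getElem?_append_left (by simp [List.length_take]; omega)]
    rw [List.getElem?_take_of_lt (by omega), List.getElem?_eq_getElem hj]

lemma pv_len_stepB (res u : List Int) : (pvStepB res u).length = res.length := by
  unfold pvStepB
  dsimp only
  rw [(pv_slice_split res (PySem.List.pyGetD u 0 0)).1,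
      (pv_slice_split res (PySem.List.pyGetD u 0 0)).2,
      (pv_slice_split _ (PySem.List.pyGetD u 1 0 + 1)).1,
      (pv_slice_split _ (PySem.List.pyGetD u 1 0 + 1)).2,
      pv_take_drop_len, pv_take_drop_len]

lemma pv_len_prefix (res : List Int) : (pvPrefixPass res).length = res.length := by
  unfold pvPrefixPass
  exact pv_len_foldl _ (fun r x => by simp [PySem.List.length_pySetD]) _ res

lemma pv_get_set (r : List Int) (i w : Int) (h0 : 0 ≤ i) (h1 : i < (r.length : Int)) (j : Nat) :
    PySem.List.pyGetD (PySem.List.pySetD r i w) (j : Int) 0 =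
      if (j : Int) = i then w else PySem.List.pyGetD r (j : Int) 0 := by
  have hi : i = ((i.toNat : Nat) : Int) := by omega
  rw [hi, PySem.List.pyGetD_pySetD_natCast r i.toNat j w 0 (by omega)]
  split_ifs with a b <;> first | rfl | (exfalso; omega)

-- res with res[i] += w (used to phrase A's point updates)
def pvAddAt (res : List Int) (i w : Int) : List Int :=
  PySem.List.pySetD res i (PySem.List.pyGetD res i 0 + w)

lemma pv_addAt_get (r : List Int) (i w : Int) (h0 : 0 ≤ i) (h1 : i < (r.length : Int)) (j : Nat) :
    PySem.List.pyGetD (pvAddAt r i w) (j : Int) 0 =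
      PySem.List.pyGetD r (j : Int) 0 + (if (j : Int) = i then w else 0) := by
  unfold pvAddAt
  rw [pv_get_set r i _ h0 h1 j]
  split_ifs with h
  · rw [← h]
  · simp

lemma pv_idx_wrap (n : Nat) (i : Int) (h0 : -(n:Int) ≤ i) (h1 : i < 0) :
    PySem.List.pyIdx? n i = PySem.List.pyIdx? n (i + n) := by
  simp only [PySem.List.pyIdx?]
  rw [if_neg (by omega), if_pos (by omega), if_pos (by omega), if_pos (by omega)]
  congr 1
  omega

lemma pv_get_wrap {α : Type} (xs : List α) (i : Int) (d : α)
    (h0 : -(xs.length:Int) ≤ i) (h1 : i < 0) :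
    PySem.List.pyGetD xs i d = PySem.List.pyGetD xs (i + xs.length) d := by
  simp only [PySem.List.pyGetD, PySem.List.pyGet?, pv_idx_wrap xs.length i h0 h1]

lemma pv_set_wrap {α : Type} (xs : List α) (i : Int) (v : α)
    (h0 : -(xs.length:Int) ≤ i) (h1 : i < 0) :
    PySem.List.pySetD xs i v = PySem.List.pySetD xs (i + xs.length) v := by
  simp only [PySem.List.pySetD, PySem.List.pySet?, pv_idx_wrap xs.length i h0 h1]

lemma pv_addAt_wrap_get (r : List Int) (i w : Int)
    (h0 : -(r.length:Int) ≤ i) (h1 : i < (r.length : Int)) (j : Nat) :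
    PySem.List.pyGetD (PySem.List.pySetD r i (PySem.List.pyGetD r i 0 + w)) (j : Int) 0 =
      PySem.List.pyGetD r (j : Int) 0 +
        (if (j : Int) = (if i < 0 then i + (r.length:Int) else i) then w else 0) := by
  by_cases hneg : i < 0
  · rw [pv_get_wrap r i 0 h0 hneg, pv_set_wrap r i _ h0 hneg, if_pos hneg]
    exact pv_addAt_get r (i + r.length) w (by omega) (by omega) j
  · rw [if_neg hneg]
    exact pv_addAt_get r i w (by omega) h1 j

lemma pv_stepA_get_wide (r u : List Int)
    (hs0 : -(r.length:Int) ≤ PySem.List.pyGetD u 0 0)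
    (hs1 : PySem.List.pyGetD u 0 0 < (r.length : Int))
    (hg : PySem.List.pyGetD u 1 0 + 1 < (r.length : Int) →
          -(r.length:Int) ≤ PySem.List.pyGetD u 1 0 + 1)
    (j : Nat) (hj : j < r.length) :
    PySem.List.pyGetD (pvStepA r u) (j : Int) 0 =
      PySem.List.pyGetD r (j : Int) 0 +
        ((if (j : Int) = (if PySem.List.pyGetD u 0 0 < 0
                          then PySem.List.pyGetD u 0 0 + (r.length:Int)
                          else PySem.List.pyGetD u 0 0) then PySem.List.pyGetD u 2 0 else 0) +
         (if ((j : Int) = (if PySem.List.pyGetD u 1 0 + 1 < 0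
                           then PySem.List.pyGetD u 1 0 + 1 + (r.length:Int)
                           else PySem.List.pyGetD u 1 0 + 1) ∧
              PySem.List.pyGetD u 1 0 + 1 < (r.length : Int))
          then -PySem.List.pyGetD u 2 0 else 0)) := by
  unfold pvStepA
  dsimp only
  set s := PySem.List.pyGetD u 0 0 with hsdef
  set e := PySem.List.pyGetD u 1 0 with hedef
  set v := PySem.List.pyGetD u 2 0 with hvdef
  set r1 := PySem.List.pySetD r s (PySem.List.pyGetD r s 0 + v) with hr1
  have hlen : r1.length = r.length := PySem.List.length_pySetD r s _
  rw [hlen]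
  have hget1 : ∀ k : Nat, PySem.List.pyGetD r1 (k : Int) 0 =
      PySem.List.pyGetD r (k : Int) 0 +
        (if (k : Int) = (if s < 0 then s + (r.length:Int) else s) then v else 0) :=
    fun k => pv_addAt_wrap_get r s v hs0 hs1 k
  by_cases hc : e + 1 < (r.length : Int)
  · rw [if_pos hc]
    rw [sub_eq_add_neg]
    have h2 := pv_addAt_wrap_get r1 (e + 1) (-v) (by rw [hlen]; exact hg hc) (by rw [hlen]; omega) j
    rw [h2, hlen, hget1 j]
    split_ifs <;> omega
  · rw [if_neg hc, hget1 j]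
    split_ifs <;> omega

lemma pv_sum_ind_eq (j : Nat) (s v : Int) (hs : 0 ≤ s) :
    ((List.range (j + 1)).map (fun k : Nat => if (k : Int) = s then v else 0)).sum =
      if s ≤ (j : Int) then v else 0 := by
  induction j with
  | zero => simp; split_ifs with a b <;> omega
  | succ n ih =>
      rw [List.range_succ, List.map_append, List.sum_append, ih]
      simp only [List.map_cons, List.map_nil, List.sum_cons, List.sum_nil]
      split_ifs <;> push_cast at * <;> omega

lemma pv_partial_succ (res : List Int) (k : Nat) :
    pvPartial res (k + 1) = pvPartial res k + PySem.List.pyGetD res (((k+1 : Nat) : Int)) 0 := by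
  unfold pvPartial
  rw [List.range_succ, List.map_append, List.sum_append,
      PySem.List.pyGetD_of_nonneg res 0 (by omega)]
  simp [List.getD_eq_getElem?_getD]

lemma pv_partial_zero (res : List Int) : pvPartial res 0 = PySem.List.pyGetD res 0 0 := by
  rw [pvPartial, PySem.List.pyGetD_of_nonneg res 0 (by omega)]
  simp [List.getD_eq_getElem?_getD]

lemma pv_partial_stepA_wide (r u : List Int)
    (hs0 : -(r.length:Int) ≤ PySem.List.pyGetD u 0 0)
    (hs1 : PySem.List.pyGetD u 0 0 < (r.length : Int))
    (hg : PySem.List.pyGetD u 1 0 + 1 < (r.length : Int) →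
          -(r.length:Int) ≤ PySem.List.pyGetD u 1 0 + 1)
    (j : Nat) (hj : j < r.length) :
    pvPartial (pvStepA r u) j = pvPartial r j + pvContrib u (r.length : Int) j := by
  set s := PySem.List.pyGetD u 0 0 with hsdef
  set e := PySem.List.pyGetD u 1 0 with hedef
  set v := PySem.List.pyGetD u 2 0 with hvdef
  set s' := (if s < 0 then s + (r.length:Int) else s) with hs'def
  set t' := (if e + 1 < 0 then e + 1 + (r.length:Int) else e + 1) with ht'def
  unfold pvPartial
  rw [List.map_congr_left (fun k hk => pv_stepA_get_wide r u hs0 hs1 hg k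
        (by have := List.mem_range.mp hk; omega))]
  rw [PySem.List.sum_map_add_int, PySem.List.sum_map_add_int,
      pv_sum_ind_eq j s' v (by omega)]
  unfold pvContrib
  rw [← hsdef, ← hedef, ← hvdef, ← hs'def, ← ht'def]
  by_cases hc : e + 1 < (r.length : Int)
  · have ht0 : 0 ≤ t' := by have := hg hc; omega
    rw [List.map_congr_left (l := List.range (j+1))
        (f := fun k : Nat => if (k : Int) = t' ∧ e + 1 < (r.length:Int) then -v else 0)
        (g := fun k : Nat => if (k : Int) = t' then -v else 0)
        (fun k _ => by simp [hc])]
    rw [pv_sum_ind_eq j t' (-v) ht0]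
    split_ifs <;> omega
  · rw [List.map_congr_left (l := List.range (j+1))
        (f := fun k : Nat => if (k : Int) = t' ∧ e + 1 < (r.length:Int) then -v else 0)
        (g := fun _ : Nat => (0:Int)) (fun k _ => by simp [hc])]
    simp only [List.map_const', List.sum_replicate, smul_zero]
    split_ifs <;> omega

lemma pv_partial_fold (j : Nat) :
    ∀ (us : List (List Int)) (r : List Int), j < r.length →
    (∀ u ∈ us, -(r.length:Int) ≤ PySem.List.pyGetD u 0 0 ∧
      PySem.List.pyGetD u 0 0 < (r.length : Int) ∧
      (PySem.List.pyGetD u 1 0 + 1 < (r.length : Int) →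
       -(r.length:Int) ≤ PySem.List.pyGetD u 1 0 + 1)) →
    pvPartial (us.foldl pvStepA r) j =
      pvPartial r j + (us.map (fun u => pvContrib u (r.length : Int) j)).sum := by
  intro us
  induction us with
  | nil => intro r _ _; simp
  | cons u t ih =>
      intro r hj h
      obtain ⟨h1, h2, h3⟩ := h u List.mem_cons_self
      simp only [List.foldl_cons, List.map_cons, List.sum_cons]
      have hlen := pv_len_stepA r u
      rw [ih (pvStepA r u) (by omega) (fun w hw => by
            rw [hlen]; exact h w (List.mem_cons_of_mem u hw)),
          hlen, pv_partial_stepA_wide r u h1 h2 h3 j hj]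
      ring

lemma pv_prefix_loop (res0 : List Int) :
    ∀ (fuel m : Nat) (r : List Int), r.length = res0.length → 1 ≤ m → res0.length - m = fuel →
    (∀ k : Nat, k < res0.length →
      PySem.List.pyGetD r (k : Int) 0 =
        if k < m then pvPartial res0 k else PySem.List.pyGetD res0 (k : Int) 0) →
    ∀ j : Nat, j < res0.length →
    PySem.List.pyGetD
        ((PySem.List.pyRange (m : Int) (res0.length : Int)).foldl
          (fun r i => PySem.List.pySetD r i (PySem.List.pyGetD r i 0 + PySem.List.pyGetD r (i - 1) 0)) r)
        (j : Int) 0 = pvPartial res0 j := by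
  intro fuel
  induction fuel with
  | zero =>
      intro m r hlen hm hf hinv j hj
      rw [PySem.List.pyRange_one_eq_nil (by omega)]
      simp only [List.foldl_nil]
      rw [hinv j hj, if_pos (by omega)]
  | succ n ih =>
      intro m r hlen hm hf hinv j hj
      have hmn : m < res0.length := by omega
      rw [PySem.List.pyRange_one_cons (by exact_mod_cast hmn)]
      simp only [List.foldl_cons]
      have e1 : PySem.List.pyGetD r (m : Int) 0 = PySem.List.pyGetD res0 (m : Int) 0 := by
        rw [hinv m hmn, if_neg (by omega)]
      have e2 : PySem.List.pyGetD r ((m : Int) - 1) 0 = pvPartial res0 (m - 1) := by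
        have hc : ((m : Int) - 1) = (((m - 1 : Nat)) : Int) := by omega
        rw [hc, hinv (m-1) (by omega), if_pos (by omega)]
      rw [e1, e2]
      set r' := PySem.List.pySetD r (m : Int)
        (PySem.List.pyGetD res0 (m : Int) 0 + pvPartial res0 (m - 1)) with hr'
      have hlen' : r'.length = res0.length := by
        rw [hr', PySem.List.length_pySetD, hlen]
      have hinv' : ∀ k : Nat, k < res0.length →
          PySem.List.pyGetD r' (k : Int) 0 =
            if k < m + 1 then pvPartial res0 k else PySem.List.pyGetD res0 (k : Int) 0 := by
        intro k hk
        rw [hr', pv_get_set r (m : Int) _ (by omega) (by omega) k]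
        by_cases hkm : k = m
        · subst hkm
          rw [if_pos rfl, if_pos (by omega)]
          have hk1 : k - 1 + 1 = k := by omega
          have hps := pv_partial_succ res0 (k - 1)
          rw [hk1] at hps
          omega
        · rw [if_neg (by exact_mod_cast hkm), hinv k hk]
          by_cases h2 : k < m
          · rw [if_pos h2, if_pos (by omega)]
          · rw [if_neg h2, if_neg (by omega)]
      have hres := ih (m + 1) r' hlen' (by omega) (by omega) hinv' j hj
      rw [show ((m : Int) + 1) = (((m + 1 : Nat)) : Int) by push_cast; ring]
      exact hres

lemma pv_prefix_get (r : List Int) (j : Nat) (hj : j < r.length) :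
    PySem.List.pyGetD (pvPrefixPass r) (j : Int) 0 = pvPartial r j := by
  unfold pvPrefixPass
  have h := pv_prefix_loop r (r.length - 1) 1 r rfl (by omega) (by omega) ?_ j hj
  · rw [← h]
    norm_num
  · intro k hk
    by_cases h : k < 1
    · have hk0 : k = 0 := by omega
      subst hk0
      rw [if_pos h, pv_partial_zero]
      norm_num
    · rw [if_neg h]

lemma pv_get_repl (n j : Nat) : PySem.List.pyGetD (List.replicate n (0:Int)) ((j : Nat) : Int) 0 = 0 := by
  rw [PySem.List.pyGetD_natCast]
  simp [List.getD_eq_getElem?_getD, List.getElem?_replicate]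
  split <;> rfl

lemma pv_partial_repl (n j : Nat) : pvPartial (List.replicate n (0:Int)) j = 0 := by
  unfold pvPartial
  rw [List.map_congr_left (fun k _ => pv_get_repl n k)]
  simp

lemma pv_res0_eq (length : Int) :
    (PySem.List.pyRange 0 length).map (fun _ => (0 : Int)) = List.replicate length.toNat 0 := by
  rw [PySem.List.pyRange_one]
  simp [Function.comp_def, List.map_const']

-- B's per-update step adds exactly A's cumulated marks at every index
lemma pv_stepB_get (r u : List Int)
    (hs0 : -(r.length : Int) ≤ PySem.List.pyGetD u 0 0)
    (hs1 : PySem.List.pyGetD u 0 0 < (r.length : Int))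
    (hg : PySem.List.pyGetD u 1 0 + 1 < (r.length : Int) →
          -(r.length : Int) ≤ PySem.List.pyGetD u 1 0 + 1)
    (j : Nat) (hj : j < r.length) :
    PySem.List.pyGetD (pvStepB r u) (j : Int) 0 =
      PySem.List.pyGetD r (j : Int) 0 + pvContrib u (r.length : Int) j := by
  unfold pvStepB pvContrib
  dsimp only
  set s := PySem.List.pyGetD u 0 0 with hsdef
  set e := PySem.List.pyGetD u 1 0 with hedef
  set v := PySem.List.pyGetD u 2 0 with hvdef
  have hLpos : 0 < (r.length : Int) := by omega
  have he0 : -(r.length : Int) ≤ e + 1 := by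
    by_cases hc : e + 1 < (r.length : Int)
    · exact hg hc
    · omega
  obtain ⟨hp1, hp2⟩ := pv_slice_split r s
  rw [hp1, hp2]
  set k1 := (if s < 0 then (s + r.length).toNat else s.toNat) with hk1def
  set r1 := r.take k1 ++ (r.drop k1).map (fun x => x + v) with hr1
  have hl1 : r1.length = r.length := pv_take_drop_len r k1 _
  obtain ⟨hq1, hq2⟩ := pv_slice_split r1 (e + 1)
  rw [hq1, hq2]
  set k2 := (if e + 1 < 0 then (e + 1 + r1.length).toNat else (e + 1).toNat) with hk2def
  rw [pv_take_drop_get r1 k2 _ j (by omega)]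
  have hg1 : PySem.List.pyGetD r1 (j : Int) 0 =
      if k1 ≤ j then PySem.List.pyGetD r (j : Int) 0 + v else PySem.List.pyGetD r (j : Int) 0 :=
    pv_take_drop_get r k1 _ j hj
  have hk1v : (k1 : Int) = if s < 0 then s + (r.length : Int) else s := by
    rw [hk1def]
    split_ifs <;> omega
  have hk2v : (k2 : Int) = if e + 1 < 0 then e + 1 + (r.length : Int) else e + 1 := by
    rw [hk2def, hl1]
    split_ifs <;> omega
  rw [hg1]
  by_cases hA : s < 0
  · rw [if_pos hA] at hk1v
    rw [if_pos hA]
    by_cases hB : e + 1 < 0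
    · rw [if_pos hB] at hk2v
      rw [if_pos hB]
      split_ifs <;> omega
    · rw [if_neg hB] at hk2v
      rw [if_neg hB]
      split_ifs <;> omega
  · rw [if_neg hA] at hk1v
    rw [if_neg hA]
    by_cases hB : e + 1 < 0
    · rw [if_pos hB] at hk2v
      rw [if_pos hB]
      split_ifs <;> omega
    · rw [if_neg hB] at hk2v
      rw [if_neg hB]
      split_ifs <;> omega

lemma pv_fold_B (j : Nat) :
    ∀ (us : List (List Int)) (r : List Int), j < r.length →
    (∀ u ∈ us, -(r.length : Int) ≤ PySem.List.pyGetD u 0 0 ∧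
      PySem.List.pyGetD u 0 0 < (r.length : Int) ∧
      (PySem.List.pyGetD u 1 0 + 1 < (r.length : Int) →
       -(r.length : Int) ≤ PySem.List.pyGetD u 1 0 + 1)) →
    PySem.List.pyGetD (us.foldl pvStepB r) (j : Int) 0 =
      PySem.List.pyGetD r (j : Int) 0 + (us.map (fun u => pvContrib u (r.length : Int) j)).sum := by
  intro us
  induction us with
  | nil => intro r _ _; simp
  | cons u t ih =>
      intro r hj h
      obtain ⟨h1, h2, h3⟩ := h u List.mem_cons_self
      simp only [List.foldl_cons, List.map_cons, List.sum_cons]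
      have hlen := pv_len_stepB r u
      rw [ih (pvStepB r u) (by omega) (fun w hw => by
            rw [hlen]; exact h w (List.mem_cons_of_mem u hw)),
          hlen, pv_stepB_get r u h1 h2 h3 j hj]
      ring

-- ===== VERDICT (by name: the statement is the Claim_ definition above) =====
theorem getModifiedArray_spec : Claim_equal_getModifiedArray := by
  intro length updates _ hpre
  unfold Spec_getModifiedArray getModifiedArray getModifiedArray_alt
  rw [pv_res0_eq]
  set L0 := length.toNat with hL0
  have hlmidA : (updates.foldl pvStepA (List.replicate L0 (0:Int))).length = L0 := by
    rw [pv_len_foldl pvStepA pv_len_stepA updates, List.length_replicate]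
  have hlmidB : (updates.foldl pvStepB (List.replicate L0 (0:Int))).length = L0 := by
    rw [pv_len_foldl pvStepB pv_len_stepB updates, List.length_replicate]
  apply pv_ext (by rw [pv_len_prefix, hlmidA, hlmidB])
  intro j hj
  have hjL : j < L0 := by rwa [hlmidB] at hj
  have hLrepl : ((List.replicate L0 (0:Int)).length : Int) = (L0 : Int) := by
    simp
  have hLeq : ((L0 : Nat) : Int) = length := by
    rcases updates with _ | ⟨u, t⟩
    · omega
    · obtain ⟨-, h0, h1, -⟩ := hpre u List.mem_cons_self
      omega
  have hpre' : ∀ u ∈ updates,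
      -((List.replicate L0 (0:Int)).length : Int) ≤ PySem.List.pyGetD u 0 0 ∧
      PySem.List.pyGetD u 0 0 < ((List.replicate L0 (0:Int)).length : Int) ∧
      (PySem.List.pyGetD u 1 0 + 1 < ((List.replicate L0 (0:Int)).length : Int) →
       -((List.replicate L0 (0:Int)).length : Int) ≤ PySem.List.pyGetD u 1 0 + 1) := by
    intro u hu
    obtain ⟨-, h0, h1, h2⟩ := hpre u hu
    rw [hLrepl, hLeq]
    exact ⟨h0, h1, fun hc => h2 hc⟩
  rw [pv_prefix_get _ j (by rwa [hlmidA]),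
      pv_partial_fold j updates (List.replicate L0 (0:Int)) (by simpa using hjL) hpre',
      pv_partial_repl, zero_add,
      pv_fold_B j updates (List.replicate L0 (0:Int)) (by simpa using hjL) hpre',
      pv_get_repl, zero_add]
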